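-- pv_equiv track=rewrite | github.com/pypi-data/pypi-mirror-288 | packages/AkitaCode/AkitaCode-2.0.11.tar.gz/AkitaCode-2.0.11/AkitaCode/conditionals.py | filtrar_combinaciones_mixtas
-- ===== SOURCE A (Python) =====
-- import operator
--
-- def filtrar_combinaciones_mixtas(combinaciones, condiciones):
--     operadores = {
--         "==": operator.eq,
--         "!=": operator.ne,
--         "<": operator.lt,
--         "<=": operator.le,
--         ">": operator.gt,
--         ">=": operator.ge,
--     }
--
--     combinaciones_filtradas = []
--
--     for combinacion in combinaciones:
--         resultado_previo = None
--         operacion_logica_anterior = None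
--
--         for i, cond in enumerate(condiciones):
--             clave, operador, valor, operacion_logica = cond
--             funcion_operador = operadores[operador]
--             resultado_actual = funcion_operador(combinacion[clave], valor)
--
--             if i == 0:
--                 resultado_previo = resultado_actual
--             else:
--                 if operacion_logica_anterior == "AND":
--                     resultado_previo = resultado_previo and resultado_actual
--                 elif operacion_logica_anterior == "OR":
--                     resultado_previo = resultado_previo or resultado_actual
--
--             operacion_logica_anterior = operacion_logica
--
--         if resultado_previo:
--             combinaciones_filtradas.append(combinacion)
--
--     return combinaciones_filtradas
-- ===== SOURCE B (Python) =====
-- import operator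
--
-- _OPERADORES = {
--     "==": operator.eq,
--     "!=": operator.ne,
--     "<": operator.lt,
--     "<=": operator.le,
--     ">": operator.gt,
--     ">=": operator.ge,
-- }
--
-- def _pares(combinacion, condiciones):
--     # eagerly evaluate every condition (all key lookups happen), tagging each
--     # result with the connective that PRECEDES it (None for the first one)
--     previo = None
--     pares = []
--     for clave, op, valor, logica in condiciones:
--         pares.append((_OPERADORES[op](combinacion[clave], valor), previo))
--         previo = logica
--     return pares
--
-- def _cumple(combinacion, condiciones):
--     # closed-form "revival point" characterisation of the left-to-right AND/OR
--     # chain: it is true iff some condition that is first or preceded by "OR"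
--     # holds and every "AND"-preceded condition after it holds too.  One
--     # right-to-left pass maintains suf = "every AND-preceded condition strictly
--     # after here holds" and found = the existential.
--     found = False
--     suf = True
--     for res, conn in reversed(_pares(combinacion, condiciones)):
--         if (conn is None or conn == "OR") and res and suf:
--             found = True
--         suf = suf and (conn != "AND" or res)
--     return found
--
-- def filtrar_combinaciones_mixtas(combinaciones, condiciones):
--     return [c for c in combinaciones if _cumple(c, condiciones)]
-- ===== Notes on version B (the rewrite author's own statement) =====
-- stated objective: alternative
-- what changed: B replaces A's stateful left-to-right AND/OR accumulator with a closed-form existential characterisation of the chain (true iff some first-or-OR-preceded condition holds and every AND-preceded condition after it holds), evaluated in one right-to-left pass over the eagerly computed (result, preceding-connective) pairs.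
import Mathlib
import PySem

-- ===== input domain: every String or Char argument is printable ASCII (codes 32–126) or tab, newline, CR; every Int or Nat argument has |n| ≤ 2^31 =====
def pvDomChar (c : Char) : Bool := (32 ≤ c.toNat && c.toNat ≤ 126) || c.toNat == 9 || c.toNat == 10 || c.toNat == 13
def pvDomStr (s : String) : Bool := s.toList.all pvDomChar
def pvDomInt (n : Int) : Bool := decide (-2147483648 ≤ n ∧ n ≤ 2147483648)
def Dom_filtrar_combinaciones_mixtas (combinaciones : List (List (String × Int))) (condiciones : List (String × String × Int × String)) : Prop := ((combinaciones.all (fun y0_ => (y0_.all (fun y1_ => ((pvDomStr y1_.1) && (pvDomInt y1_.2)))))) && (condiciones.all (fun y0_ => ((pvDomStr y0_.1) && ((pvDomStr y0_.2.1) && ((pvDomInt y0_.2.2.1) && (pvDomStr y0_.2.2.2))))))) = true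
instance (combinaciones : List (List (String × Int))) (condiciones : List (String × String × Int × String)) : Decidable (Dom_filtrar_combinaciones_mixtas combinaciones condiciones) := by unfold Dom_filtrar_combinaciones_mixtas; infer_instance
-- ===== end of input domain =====

-- B replaces A's stateful left-to-right AND/OR accumulator with a closed-form
-- existential characterisation evaluated in one right-to-left pass; same cost,
-- return values proved equal on Pre_.

-- ===== PORT A =====
-- the operator table applied: total stand-in for operadores[operador](a, valor);
-- unknown operator strings (Python KeyError) are excluded by Pre_
def pvApplyOp (op : String) (a v : Int) : Bool :=
  if op == "==" then a == v
  else if op == "!=" then a != v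
  else if op == "<" then decide (a < v)
  else if op == "<=" then decide (a ≤ v)
  else if op == ">" then decide (a > v)
  else decide (a ≥ v)

-- combinacion[clave]: first-match dict lookup; missing key (Python KeyError) excluded by Pre_
def pvLookup (comb : List (String × Int)) (clave : String) : Int :=
  (List.lookup clave comb).getD 0

-- one iteration of A's inner loop; state = (resultado_previo, operacion_logica_anterior)
def pvStepA (comb : List (String × Int)) (st : Option Bool × Option String)
    (ic : Int × (String × String × Int × String)) : Option Bool × Option String :=
  let ra := pvApplyOp ic.2.2.1 (pvLookup comb ic.2.1) ic.2.2.2.1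
  let prev : Option Bool :=
    if ic.1 == 0 then some ra
    else if st.2 == some "AND" then some (st.1.getD false && ra)
    else if st.2 == some "OR" then some (st.1.getD false || ra)
    else st.1
  (prev, some ic.2.2.2.2)

def filtrar_combinaciones_mixtas (combinaciones : List (List (String × Int))) (condiciones : List (String × String × Int × String)) : List (List (String × Int)) :=
  combinaciones.foldl
    (fun acc combinacion =>
      if (((PySem.List.enumerate condiciones 0).foldl (pvStepA combinacion) (none, none)).1).getD false
      then acc ++ [combinacion] else acc)
    []

-- ===== PORT B =====
-- _pares: each condition's eagerly evaluated result, tagged with the connective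
-- that precedes it (none for the first condition)
def pvPares (comb : List (String × Int)) (previo : Option String)
    (condiciones : List (String × String × Int × String)) : List (Bool × Option String) :=
  match condiciones with
  | [] => []
  | c :: t => (pvApplyOp c.2.1 (pvLookup comb c.1) c.2.2.1, previo) :: pvPares comb (some c.2.2.2) t

-- one iteration of B's right-to-left loop; state = (found, suf)
def pvStepB (st : Bool × Bool) (p : Bool × Option String) : Bool × Bool :=
  (st.1 || ((p.2 == none || p.2 == some "OR") && p.1 && st.2),
   st.2 && (p.2 != some "AND" || p.1))

def pvCumple (combinacion : List (String × Int)) (condiciones : List (String × String × Int × String)) : Bool :=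
  ((pvPares combinacion none condiciones).reverse.foldl pvStepB (false, true)).1

def filtrar_combinaciones_mixtas_alt (combinaciones : List (List (String × Int))) (condiciones : List (String × String × Int × String)) : List (List (String × Int)) :=
  combinaciones.filter (fun c => pvCumple c condiciones)

-- ===== PRECONDITION & SPEC =====
-- Pre_ excludes exactly the inputs where the Python raises KeyError: an operator string
-- outside the operadores table, or a condition key missing from some combination.
def Pre_filtrar_combinaciones_mixtas (combinaciones : List (List (String × Int))) (condiciones : List (String × String × Int × String)) : Prop :=
  ∀ comb ∈ combinaciones, ∀ cond ∈ condiciones,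
    cond.2.1 ∈ ["==", "!=", "<", "<=", ">", ">="] ∧ (List.lookup cond.1 comb).isSome = true
instance (combinaciones : List (List (String × Int))) (condiciones : List (String × String × Int × String)) : Decidable (Pre_filtrar_combinaciones_mixtas combinaciones condiciones) := by unfold Pre_filtrar_combinaciones_mixtas; infer_instance

def pvWitness_filtrar_combinaciones_mixtas : (List (List (String × Int))) × (List (String × String × Int × String)) :=
  ([[("a", 1), ("b", 2)], [("a", 3), ("b", 0)]], [("a", ">=", 2, "OR"), ("b", "==", 2, "AND")])

def Spec_filtrar_combinaciones_mixtas (combinaciones : List (List (String × Int))) (condiciones : List (String × String × Int × String)) (out : List (List (String × Int))) : Prop := out = filtrar_combinaciones_mixtas_alt combinaciones condiciones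
instance (combinaciones : List (List (String × Int))) (condiciones : List (String × String × Int × String)) (out : List (List (String × Int))) : Decidable (Spec_filtrar_combinaciones_mixtas combinaciones condiciones out) := by unfold Spec_filtrar_combinaciones_mixtas; infer_instance

-- ===== CLAIM (what is proved, stated in full; the proofs are below) =====
def Claim_equal_filtrar_combinaciones_mixtas : Prop := ∀ (combinaciones : List (List (String × Int))) (condiciones : List (String × String × Int × String)), Dom_filtrar_combinaciones_mixtas combinaciones condiciones → Pre_filtrar_combinaciones_mixtas combinaciones condiciones → Spec_filtrar_combinaciones_mixtas combinaciones condiciones (filtrar_combinaciones_mixtas combinaciones condiciones)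

-- ===== LEMMAS AND PROOFS =====

-- A's inner-loop combination closed over one logic tag (proof-side abbreviation)
def pvCombine (b : Bool) (l : String) (r : Bool) : Bool :=
  if l == "AND" then b && r else if l == "OR" then b || r else b

-- B's right-to-left pass as a foldr (the reversed loop)
def pvFoldrB (ps : List (Bool × Option String)) : Bool × Bool :=
  ps.foldr (fun p st => pvStepB st p) (false, true)

theorem pvCumple_foldr (comb : List (String × Int)) (conds : List (String × String × Int × String)) :
    pvCumple comb conds = (pvFoldrB (pvPares comb none conds)).1 := by
  simp [pvCumple, pvFoldrB, List.foldl_reverse]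

-- A's inner loop after the first condition equals B's existential characterisation
theorem pv_main (comb : List (String × Int)) (rest : List (String × String × Int × String)) :
    ∀ (n : Int) (b : Bool) (l : String), 0 < n →
    (((PySem.List.enumerate rest n).foldl (pvStepA comb) (some b, some l)).1).getD false
      = ((pvFoldrB (pvPares comb (some l) rest)).1
         || (b && (pvFoldrB (pvPares comb (some l) rest)).2)) := by
  induction rest with
  | nil => intro n b l hn; simp [PySem.List.enumerate_nil, pvFoldrB, pvPares]
  | cons c rest ih =>
    intro n b l hn
    rw [PySem.List.enumerate_cons]
    simp only [List.foldl_cons]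
    have hstep : pvStepA comb (some b, some l) (n, c)
        = (some (pvCombine b l (pvApplyOp c.2.1 (pvLookup comb c.1) c.2.2.1)), some c.2.2.2) := by
      simp only [pvStepA, pvCombine]
      have : (n == 0) = false := by simpa using (by omega : n ≠ 0)
      simp only [this, Bool.false_eq_true, if_false]
      by_cases h1 : l = "AND" <;> by_cases h2 : l = "OR" <;> simp [h1, h2]
    rw [hstep, ih (n + 1) _ _ (by omega)]
    -- unfold one step of B's foldr on the matching pares list
    simp only [pvPares, pvFoldrB, List.foldr_cons]
    set r := pvApplyOp c.2.1 (pvLookup comb c.1) c.2.2.1 with hr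
    set st := (pvPares comb (some c.2.2.2) rest).foldr (fun p st => pvStepB st p) (false, true) with hst
    by_cases h1 : l = "AND" <;> by_cases h2 : l = "OR" <;>
      cases r <;> cases b <;> cases hf : st.1 <;> cases hs : st.2 <;>
      simp [pvStepB, pvCombine, h1, h2, hf, hs]

-- per-combination agreement of the two truth evaluations
theorem pv_cumple_eq (comb : List (String × Int)) (conds : List (String × String × Int × String)) :
    (((PySem.List.enumerate conds 0).foldl (pvStepA comb) (none, none)).1).getD false
      = pvCumple comb conds := by
  rw [pvCumple_foldr]
  cases conds with
  | nil => simp [PySem.List.enumerate_nil, pvFoldrB, pvPares]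
  | cons c rest =>
    rw [PySem.List.enumerate_cons]
    simp only [List.foldl_cons]
    have hstep : pvStepA comb (none, none) (0, c)
        = (some (pvApplyOp c.2.1 (pvLookup comb c.1) c.2.2.1), some c.2.2.2) := by
      simp [pvStepA]
    rw [hstep]
    simp only [zero_add]
    rw [pv_main comb rest 1 _ _ (by omega)]
    simp only [pvPares, pvFoldrB, List.foldr_cons]
    set r := pvApplyOp c.2.1 (pvLookup comb c.1) c.2.2.1 with hr
    set st := (pvPares comb (some c.2.2.2) rest).foldr (fun p st => pvStepB st p) (false, true) with hst
    cases r <;> cases hf : st.1 <;> cases hs : st.2 <;> simp [pvStepB, hf, hs]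

-- ===== VERDICT (by name: the statement is the Claim_ definition above) =====
theorem filtrar_combinaciones_mixtas_spec : Claim_equal_filtrar_combinaciones_mixtas := by
  intro combinaciones condiciones _ _
  unfold Spec_filtrar_combinaciones_mixtas filtrar_combinaciones_mixtas filtrar_combinaciones_mixtas_alt
  rw [PySem.List.foldl_append_if_eq_filter]
  rw [List.nil_append]
  apply List.filter_congr
  intro comb _
  exact pv_cumple_eq comb condiciones
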